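-- pv_equiv track=rewrite | github.com/OleVikLysne/competitive-programming | lib/math_and_geometry/vec2_tuple.py | inside_convex
-- ===== SOURCE A (Python) =====
-- def cross(v1, v2):
--     return v1[0] * v2[1] - v1[1] * v2[0]
--
-- def orient(v, v1, v2):
--     return (v1[0] - v[0]) * (v2[1] - v[1]) - (v1[1] - v[1]) * (v2[0] - v[0])
--
-- def right_of(v, other, origin=None):
--     if origin is None:
--         return cross(v, other) > 0
--     return orient(origin, v, other) > 0
--
-- def left_of(v, other, origin=None):
--     if origin is None:
--         return cross(v, other) < 0
--     return orient(origin, v, other) < 0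
--
-- def inc_left_of(v, other, origin=None):
--     return not right_of(v, other, origin)
--
-- def inside_convex(hull, p):
--     """
--     Returns true if p is inside the convex hull (or on the boundary). Assumes the hull is sorted counter-clockwise
--     """
--     n = len(hull)
--     if n < 3:
--         return False
--     if right_of(p, hull[1], hull[0]):
--         return False
--     if left_of(p, hull[n-1], hull[0]):
--         return False
--     l, r = 0, n-1
--     while l < r:
--         mid = (l+r)//2
--         if inc_left_of(p, hull[mid], hull[0]):
--             l = mid + 1
--         else:
--             r = mid
--     return inc_left_of(p, hull[r], hull[r-1])
-- ===== SOURCE B (Python) =====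
-- def inside_convex(hull, p):
--     """
--     Returns true if p is inside the convex hull (or on the boundary). Assumes the hull is sorted counter-clockwise
--     """
--     n = len(hull)
--     if n < 3:
--         return False
--
--     def side(a, b, c):
--         # sign of the determinant |b-a, c-a|: >0 iff c is strictly left of a->b
--         return (b[0] - a[0]) * (c[1] - a[1]) - (b[1] - a[1]) * (c[0] - a[0])
--
--     o = hull[0]
--     if side(o, p, hull[1]) > 0 or side(o, p, hull[-1]) < 0:
--         return False
--
--     def bisect(l, r):
--         if l >= r:
--             return r
--         m = (l + r) // 2
--         return bisect(m + 1, r) if side(o, p, hull[m]) <= 0 else bisect(l, m)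
--
--     r = bisect(0, n - 1)
--     return side(hull[r - 1], p, hull[r]) <= 0
-- ===== Notes on version B (the rewrite author's own statement) =====
-- stated objective: simpler
-- what changed: B collapses A's chain of five helper functions (cross/orient/right_of/left_of/inc_left_of with optional-origin branching) into one determinant helper, fuses the two fan-edge guards into a single test, and replaces the iterative while-loop binary search with a recursive bisect; the bisection itself is kept because a linear scan would change the result on non-convex input.
-- outside the precondition, e.g. on inside_convex([(0, 0), (2, 0), (2, 2), (9,), (0, 2)], (2, 1)): A returns True, B returns True
import Mathlib
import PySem

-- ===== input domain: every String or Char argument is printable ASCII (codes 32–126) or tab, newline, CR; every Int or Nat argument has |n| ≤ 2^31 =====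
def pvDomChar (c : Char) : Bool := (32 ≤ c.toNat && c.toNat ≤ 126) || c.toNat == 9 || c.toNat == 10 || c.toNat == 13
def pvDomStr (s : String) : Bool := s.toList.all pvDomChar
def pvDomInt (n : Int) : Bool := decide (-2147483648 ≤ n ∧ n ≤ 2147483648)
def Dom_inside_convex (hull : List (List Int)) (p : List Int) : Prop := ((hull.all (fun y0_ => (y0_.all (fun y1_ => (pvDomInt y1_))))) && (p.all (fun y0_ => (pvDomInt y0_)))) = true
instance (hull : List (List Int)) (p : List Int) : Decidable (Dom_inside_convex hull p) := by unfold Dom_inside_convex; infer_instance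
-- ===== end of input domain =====

-- ===== PORT A =====
-- B changes only the decomposition (one determinant helper, fused guards, recursive bisect); objective: simpler.
-- Point-coordinate access v[0]/v[1] and hull[i] are ported with List.getD; exact on Pre_ (all points 2D, indices in range).
def pyCross (v1 v2 : List Int) : Int :=
  v1.getD 0 0 * v2.getD 1 0 - v1.getD 1 0 * v2.getD 0 0

def pyOrient (v v1 v2 : List Int) : Int :=
  (v1.getD 0 0 - v.getD 0 0) * (v2.getD 1 0 - v.getD 1 0)
    - (v1.getD 1 0 - v.getD 1 0) * (v2.getD 0 0 - v.getD 0 0)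

def pyRightOf (v other : List Int) (origin : Option (List Int)) : Bool :=
  match origin with
  | none => pyCross v other > 0
  | some o => pyOrient o v other > 0

def pyLeftOf (v other : List Int) (origin : Option (List Int)) : Bool :=
  match origin with
  | none => pyCross v other < 0
  | some o => pyOrient o v other < 0

def pyIncLeftOf (v other : List Int) (origin : Option (List Int)) : Bool :=
  !(pyRightOf v other origin)

-- the `while l < r` loop of A
def loopA (hull : List (List Int)) (p : List Int) (l r : Nat) : Nat :=
  if l < r then
    let mid := (l + r) / 2
    if pyIncLeftOf p (hull.getD mid []) (some (hull.getD 0 [])) then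
      loopA hull p (mid + 1) r
    else
      loopA hull p l mid
  else r
  termination_by r - l
  decreasing_by all_goals omega

def inside_convex (hull : List (List Int)) (p : List Int) : Bool :=
  let n := hull.length
  if n < 3 then false
  else if pyRightOf p (hull.getD 1 []) (some (hull.getD 0 [])) then false
  else if pyLeftOf p (hull.getD (n - 1) []) (some (hull.getD 0 [])) then false
  else
    let r := loopA hull p 0 (n - 1)
    pyIncLeftOf p (hull.getD r []) (some (hull.getD (r - 1) []))

-- ===== PORT B =====
def sideB (a b c : List Int) : Int :=
  (b.getD 0 0 - a.getD 0 0) * (c.getD 1 0 - a.getD 1 0)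
    - (b.getD 1 0 - a.getD 1 0) * (c.getD 0 0 - a.getD 0 0)

def bisectB (hull : List (List Int)) (o p : List Int) (l r : Nat) : Nat :=
  if l >= r then r
  else
    let m := (l + r) / 2
    if sideB o p (hull.getD m []) <= 0 then bisectB hull o p (m + 1) r
    else bisectB hull o p l m
  termination_by r - l
  decreasing_by all_goals omega

def inside_convex_alt (hull : List (List Int)) (p : List Int) : Bool :=
  let n := hull.length
  if n < 3 then false
  else
    let o := hull.getD 0 []
    if sideB o p (hull.getD 1 []) > 0 || sideB o p (hull.getD (n - 1) []) < 0 then false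
    else
      let r := bisectB hull o p 0 (n - 1)
      sideB (hull.getD (r - 1) []) p (hull.getD r []) <= 0

-- ===== PRECONDITION & SPEC =====
-- Pre_ excludes the inputs where Python A raises IndexError: some accessed point has fewer than 2
-- coordinates. For simplicity it requires ALL hull points to be 2D, slightly narrower than the set of
-- points A actually probes (see cites: a short point at a never-probed index is excluded though A returns).
def Pre_inside_convex (hull : List (List Int)) (p : List Int) : Prop :=
  hull.length < 3 ∨ (2 ≤ p.length ∧ ∀ q ∈ hull, 2 ≤ q.length)
instance (hull : List (List Int)) (p : List Int) : Decidable (Pre_inside_convex hull p) := by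
  unfold Pre_inside_convex; infer_instance

def pvWitness_inside_convex : List (List Int) × List Int :=
  ([[0, 0], [2, 0], [1, 2]], [1, 1])

def Spec_inside_convex (hull : List (List Int)) (p : List Int) (out : Bool) : Prop := out = inside_convex_alt hull p
instance (hull : List (List Int)) (p : List Int) (out : Bool) : Decidable (Spec_inside_convex hull p out) := by unfold Spec_inside_convex; infer_instance

-- ===== CLAIM (what is proved, stated in full; the proofs are below) =====
def Claim_equal_inside_convex : Prop := ∀ (hull : List (List Int)) (p : List Int), Dom_inside_convex hull p → Pre_inside_convex hull p → Spec_inside_convex hull p (inside_convex hull p)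

-- ===== LEMMAS AND PROOFS =====
theorem rightOf_eq (v other o : List Int) :
    pyRightOf v other (some o) = decide (sideB o v other > 0) := rfl

theorem leftOf_eq (v other o : List Int) :
    pyLeftOf v other (some o) = decide (sideB o v other < 0) := rfl

theorem incLeft_eq (v other o : List Int) :
    pyIncLeftOf v other (some o) = decide (sideB o v other ≤ 0) := by
  unfold pyIncLeftOf
  rw [rightOf_eq]
  by_cases h : sideB o v other ≤ 0
  · have h2 : ¬ sideB o v other > 0 := by omega
    simp [h, h2]
  · have h2 : sideB o v other > 0 := by omega
    simp [h, h2]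

theorem loopA_eq_bisectB (hull : List (List Int)) (p : List Int) (l r : Nat) :
    loopA hull p l r = bisectB hull (hull.getD 0 []) p l r := by
  rw [loopA, bisectB]
  simp only [incLeft_eq, decide_eq_true_eq]
  by_cases hlr : l < r
  · have hge : ¬ l ≥ r := by omega
    simp only [if_pos hlr, if_neg hge]
    by_cases hc : sideB (hull.getD 0 []) p (hull.getD ((l + r) / 2) []) ≤ 0
    · simp only [if_pos hc]
      exact loopA_eq_bisectB hull p ((l + r) / 2 + 1) r
    · simp only [if_neg hc]
      exact loopA_eq_bisectB hull p l ((l + r) / 2)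
  · have hge : l ≥ r := by omega
    simp only [if_neg hlr, if_pos hge]
  termination_by r - l
  decreasing_by all_goals omega

-- ===== VERDICT (by name: the statement is the Claim_ definition above) =====
theorem inside_convex_spec : Claim_equal_inside_convex := by
  intro hull p _ _
  show inside_convex hull p = inside_convex_alt hull p
  unfold inside_convex inside_convex_alt
  by_cases hn : hull.length < 3
  · simp [hn]
  · simp only [if_neg hn, rightOf_eq, leftOf_eq, incLeft_eq, loopA_eq_bisectB]
    simp [Bool.and_assoc]
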